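-- pv_equiv track=rewrite | github.com/matt-friend/advent-of-code-2024 | solutions/day_14.py | any_stacked_robots
-- ===== SOURCE A (Python) =====
-- from collections import defaultdict
--
-- def coordstr(coords):
--     return str(coords[0]).zfill(3)+str(coords[1]).zfill(3)
--
-- def any_stacked_robots(robots):
--     d = defaultdict(int)
--     for r in robots:
--         c = coordstr([r[0], r[1]])
--         d[c] += 1
--     for k, v in d.items():
--         if v > 1:
--             return True
--     return False
-- ===== SOURCE B (Python) =====
-- def coordstr(coords):
--     return str(coords[0]).zfill(3)+str(coords[1]).zfill(3)
--
-- def any_stacked_robots(robots):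
--     seen = set()
--     for r in robots:
--         c = coordstr([r[0], r[1]])
--         if c in seen:
--             return True
--         seen.add(c)
--     return False
-- ===== Notes on version B (the rewrite author's own statement) =====
-- stated objective: simpler
-- what changed: Replaces the count-into-a-defaultdict pass followed by a second scan over the items with a single pass that keeps a set of seen coordinate strings and returns True on the first repeat.
import Mathlib
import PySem

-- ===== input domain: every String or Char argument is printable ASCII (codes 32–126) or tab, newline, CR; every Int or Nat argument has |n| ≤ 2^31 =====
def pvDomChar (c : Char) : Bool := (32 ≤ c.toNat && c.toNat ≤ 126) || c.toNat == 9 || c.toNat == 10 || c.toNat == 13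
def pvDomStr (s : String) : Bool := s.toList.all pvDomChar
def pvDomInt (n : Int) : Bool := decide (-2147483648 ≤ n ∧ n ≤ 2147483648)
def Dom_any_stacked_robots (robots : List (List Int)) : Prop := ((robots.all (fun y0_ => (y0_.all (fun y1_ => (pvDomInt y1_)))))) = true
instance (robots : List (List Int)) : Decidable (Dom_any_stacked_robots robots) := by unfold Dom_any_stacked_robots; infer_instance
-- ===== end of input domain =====

-- B replaces A's count-then-rescan (defaultdict pass plus a second scan of the items)
-- with a single pass over the robots keeping a set of seen coordinate strings, returning
-- True at the first repeat. Objective: simpler.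

-- ===== PORT A =====
-- coordstr(coords) on [r[0], r[1]]; r[0]/r[1] are in range under Pre_, so pyGetD's
-- default is never used there (exact on Pre_).
def coordstrA (r : List Int) : List Char :=
  PySem.Chars.zfill (PySem.Int.toChars (PySem.List.pyGetD r 0 0)) 3 ++
  PySem.Chars.zfill (PySem.Int.toChars (PySem.List.pyGetD r 1 0)) 3

-- second loop of A: scan the dict items, return True at the first v > 1
def scanItems : List (List Char × Int) → Bool
  | [] => false
  | (_, v) :: t => if v > 1 then true else scanItems t

-- first loop builds d (defaultdict counts, d[c] += 1), second loop is scanItems over d.items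
def any_stacked_robots (robots : List (List Int)) : Bool :=
  scanItems (robots.foldl (fun d r => d.modify (coordstrA r) 0 (· + 1))
    (PySem.Dict.empty : PySem.Dict (List Char) Int)).items

-- ===== PORT B =====
def bLoop (seen : PySem.Set (List Char)) : List (List Int) → Bool
  | [] => false
  | r :: t =>
    let c := coordstrA r
    if PySem.Set.contains seen c then true else bLoop (PySem.Set.add seen c) t

def any_stacked_robots_alt (robots : List (List Int)) : Bool :=
  bLoop PySem.Set.empty robots

-- ===== PRECONDITION & SPEC =====
-- Pre_ excludes exactly the inputs on which A raises IndexError (a robot with fewer than 2 coordinates).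
def Pre_any_stacked_robots (robots : List (List Int)) : Prop :=
  ∀ r ∈ robots, 2 ≤ r.length
instance (robots : List (List Int)) : Decidable (Pre_any_stacked_robots robots) := by
  unfold Pre_any_stacked_robots; infer_instance
def pvWitness_any_stacked_robots : List (List Int) := [[1, 2], [3, 4], [1, 2]]

def Spec_any_stacked_robots (robots : List (List Int)) (out : Bool) : Prop := out = any_stacked_robots_alt robots
instance (robots : List (List Int)) (out : Bool) : Decidable (Spec_any_stacked_robots robots out) := by unfold Spec_any_stacked_robots; infer_instance

-- ===== CLAIM (what is proved, stated in full; the proofs are below) =====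
def Claim_equal_any_stacked_robots : Prop := ∀ (robots : List (List Int)), Dom_any_stacked_robots robots → Pre_any_stacked_robots robots → Spec_any_stacked_robots robots (any_stacked_robots robots)

-- ===== LEMMAS AND PROOFS =====

theorem scanItems_eq_any (l : List (List Char × Int)) :
    scanItems l = l.any (fun kv => decide (1 < kv.2)) := by
  induction l with
  | nil => rfl
  | cons p t ih =>
    obtain ⟨k, v⟩ := p
    simp only [scanItems, List.any_cons, ih]
    split_ifs with h <;> simp [h]

theorem portA_char (robots : List (List Int)) :
    any_stacked_robots robots = !decide (robots.map coordstrA).Nodup := by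
  unfold any_stacked_robots
  rw [← List.foldl_map (f := coordstrA)
        (g := fun (d : PySem.Dict (List Char) Int) x => d.modify x 0 (· + 1)),
      ← PySem.Dict.counter_eq_foldl, PySem.Dict.items_counter, scanItems_eq_any]
  set ks := robots.map coordstrA with hks
  rw [List.any_map]
  rcases Bool.eq_false_or_eq_true (decide ks.Nodup) with h | h <;> rw [h] <;> simp
  · rw [decide_eq_true_iff, List.nodup_iff_count_le_one] at h
    intro x _
    exact h x
  · rw [decide_eq_false_iff_not, List.nodup_iff_count_le_one, not_forall] at h
    obtain ⟨k, hk⟩ := h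
    exact ⟨k, List.count_pos_iff.mp (by omega), by omega⟩

theorem bLoop_char (rs : List (List Int)) (seen : PySem.Set (List Char))
    (hnd : seen.Nodup) :
    bLoop seen rs = !decide (seen ++ rs.map coordstrA).Nodup := by
  induction rs generalizing seen with
  | nil => simp [bLoop, hnd]
  | cons r t ih =>
    by_cases hc : coordstrA r ∈ seen
    · have h1 : PySem.Set.contains seen (coordstrA r) = true :=
        (PySem.Set.contains_iff seen _).mpr hc
      rw [bLoop, h1, if_pos rfl]
      have hdup : ¬ (seen ++ coordstrA r :: List.map coordstrA t).Nodup := by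
        intro h
        rcases List.nodup_append.mp h with ⟨_, _, hdis⟩
        exact hdis _ hc _ (by simp) rfl
      simp [hdup]
    · have h1 : PySem.Set.contains seen (coordstrA r) = false :=
        Bool.eq_false_iff.mpr (fun h => hc ((PySem.Set.contains_iff seen _).mp h))
      rw [bLoop, h1, if_neg (by simp)]
      have hnd' : (seen ++ [coordstrA r]).Nodup := by
        rw [← PySem.Set.add_of_not_mem hc]
        exact PySem.Set.nodup_add seen _ hnd
      rw [PySem.Set.add_of_not_mem hc, ih _ hnd']
      congr 2
      simp

theorem portB_char (robots : List (List Int)) :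
    any_stacked_robots_alt robots = !decide (robots.map coordstrA).Nodup := by
  unfold any_stacked_robots_alt
  rw [bLoop_char robots PySem.Set.empty (by simp [PySem.Set.empty])]
  simp [PySem.Set.empty]

-- ===== VERDICT (by name: the statement is the Claim_ definition above) =====
theorem any_stacked_robots_spec : Claim_equal_any_stacked_robots := by
  intro robots _ _
  unfold Spec_any_stacked_robots
  rw [portA_char, portB_char]
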